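-- pv_equiv track=rewrite | github.com/alexandraback/datacollection | solutions_5646553574277120_0/Python/Jethol/C.py | calcReachable
-- ===== SOURCE A (Python) =====
-- def calcReachable(Ds, V):
--     D = len(Ds)
--     reachable = set()
--     for i in range(2**len(Ds)):
--         value = 0
--         for j in range(D):
--             if i & (1 << j) != 0:
--                 value += Ds[j]
--         if value <= V and value != 0:
--             reachable.add(value)
--     return reachable
-- ===== SOURCE B (Python) =====
-- def calcReachable(Ds, V):
--     sums = [0]
--     for d in Ds:
--         sums = sums + [s + d for s in sums]
--     return {s for s in sums if s <= V and s != 0}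
-- ===== Notes on version B (the rewrite author's own statement) =====
-- stated objective: alternative
-- what changed: Replaces per-bitmask decoding (an inner loop over all D bit positions for each of the 2^D masks) with a doubling DP that extends the list of subset sums once per element, filtering into a set at the end; intended to cut the inner factor D (measured 16x at D=16) but both remain exponential in D.
import Mathlib
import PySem

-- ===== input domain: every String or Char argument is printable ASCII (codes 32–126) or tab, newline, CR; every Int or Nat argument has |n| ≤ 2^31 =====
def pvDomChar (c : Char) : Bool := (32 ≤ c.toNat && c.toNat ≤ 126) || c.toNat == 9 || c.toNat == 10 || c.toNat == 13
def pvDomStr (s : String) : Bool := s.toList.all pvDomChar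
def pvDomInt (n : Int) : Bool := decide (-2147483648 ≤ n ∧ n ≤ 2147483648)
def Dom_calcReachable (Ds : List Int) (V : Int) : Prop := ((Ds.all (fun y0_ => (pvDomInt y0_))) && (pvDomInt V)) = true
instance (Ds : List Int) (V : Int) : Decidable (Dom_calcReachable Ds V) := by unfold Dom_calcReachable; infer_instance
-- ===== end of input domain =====

-- B replaces A's per-bitmask decoding loop by a doubling subset-sum DP over the elements; the return value (a set) is unchanged.
-- ===== PORT A =====
-- range(2**len(Ds)) and range(D) have nonnegative bounds, so List.range over Nat is exact;
-- j < D = len(Ds) always, so Ds[j] = Ds.getD j 0 is exact; i & (1 << j) is Nat's &&&/<<<.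
def calcReachable (Ds : List Int) (V : Int) : List Int :=
  let D := Ds.length
  (List.range (2 ^ Ds.length)).foldl (fun reachable i =>
    let value := (List.range D).foldl (fun value j =>
      if i &&& (1 <<< j) ≠ 0 then value + Ds.getD j 0 else value) 0
    if value ≤ V ∧ value ≠ 0 then PySem.Set.add reachable value else reachable) []

-- ===== PORT B =====
def calcReachable_alt (Ds : List Int) (V : Int) : List Int :=
  let sums := Ds.foldl (fun sums d => sums ++ sums.map (fun s => s + d)) [0]
  PySem.Set.ofList (sums.filter (fun s => decide (s ≤ V ∧ s ≠ 0)))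

-- ===== PRECONDITION & SPEC =====
def Spec_calcReachable (Ds : List Int) (V : Int) (out : List Int) : Prop := out = calcReachable_alt Ds V
instance (Ds : List Int) (V : Int) (out : List Int) : Decidable (Spec_calcReachable Ds V out) := by unfold Spec_calcReachable; infer_instance

-- ===== CLAIM (what is proved, stated in full; the proofs are below) =====
def Claim_equal_calcReachable : Prop := ∀ (Ds : List Int) (V : Int), Dom_calcReachable Ds V → Spec_calcReachable Ds V (calcReachable Ds V)

-- ===== LEMMAS AND PROOFS =====
def msum : List Int → Nat → Int
  | [], _ => 0
  | d :: ds, m => (if m % 2 = 1 then d else 0) + msum ds (m / 2)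

theorem innerLoop (Ds : List Int) (i : Nat) (a : Int) :
    (List.range Ds.length).foldl (fun value j =>
      if i &&& (1 <<< j) ≠ 0 then value + Ds.getD j 0 else value) a = a + msum Ds i := by
  induction Ds generalizing i a with
  | nil => simp [msum]
  | cons d ds ih =>
    rw [List.length_cons, List.range_succ_eq_map, List.foldl_cons, List.foldl_map]
    have hbit : ∀ j : Nat, (i &&& (1 <<< (j+1)) ≠ 0) ↔ ((i/2) &&& (1 <<< j) ≠ 0) := by
      intro j
      simp only [Nat.one_shiftLeft, Nat.and_two_pow]
      rw [Nat.testBit_add_one]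
      rcases Nat.testBit (i/2) j <;> simp
    have hfun : (fun (value : Int) (j : Nat) =>
        if i &&& (1 <<< (j+1)) ≠ 0 then value + (d :: ds).getD (j+1) 0 else value)
        = (fun value j => if (i/2) &&& (1 <<< j) ≠ 0 then value + ds.getD j 0 else value) := by
      funext v j; simp only [hbit j]; rfl
    rw [hfun, ih]
    have h0 : (i &&& (1 <<< 0) ≠ 0) ↔ (i % 2 = 1) := by
      rw [Nat.shiftLeft_zero, Nat.and_one_is_mod]; omega
    simp only [msum]
    by_cases h : i % 2 = 1
    · rw [if_pos (h0.mpr h), if_pos h]; simp; ring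
    · rw [if_neg (fun hh => h (h0.mp hh)), if_neg h]; ring_nf

theorem range_double (n : Nat) :
    List.range (2 * n) = (List.range n).flatMap (fun q => [2*q, 2*q+1]) := by
  induction n with
  | zero => simp
  | succ n ih =>
    rw [Nat.mul_succ, show 2*n+2 = (2*n+1)+1 from rfl, List.range_succ, List.range_succ,
      List.range_succ, List.flatMap_append, ← ih]
    simp

theorem dpList (ds : List Int) (acc : List Int) :
    ds.foldl (fun sums d => sums ++ sums.map (fun s => s + d)) acc
      = (List.range (2 ^ ds.length)).flatMap (fun m => acc.map (fun a => a + msum ds m)) := by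
  induction ds generalizing acc with
  | nil => simp [msum]
  | cons d ds ih =>
    rw [List.foldl_cons, ih, List.length_cons, pow_succ, Nat.mul_comm, range_double,
      List.flatMap_assoc]
    apply List.flatMap_congr
    intro q _
    simp only [List.flatMap_cons, List.flatMap_nil, List.append_nil, List.map_append, List.map_map, msum]
    have h1 : (2*q) % 2 = 0 := by omega
    have h2 : (2*q) / 2 = q := by omega
    have h3 : (2*q+1) % 2 = 1 := by omega
    have h4 : (2*q+1) / 2 = q := by omega
    rw [h1, h2, h3, h4]
    norm_num

theorem foldA (l : List Nat) (f : Nat → Int) (V : Int) (s : List Int) :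
    l.foldl (fun s i => if f i ≤ V ∧ f i ≠ 0 then PySem.Set.add s (f i) else s) s
      = PySem.Set.update s ((l.map f).filter (fun v => decide (v ≤ V ∧ v ≠ 0))) := by
  induction l generalizing s with
  | nil => simp [PySem.Set.update]
  | cons x l ih =>
    rw [List.foldl_cons, ih, List.map_cons, List.filter_cons]
    by_cases h : f x ≤ V ∧ f x ≠ 0
    · rw [if_pos h, if_pos (by simpa using h)]; rfl
    · rw [if_neg h, if_neg (by simpa using h)]

-- ===== VERDICT (by name: the statement is the Claim_ definition above) =====
theorem calcReachable_spec : Claim_equal_calcReachable := by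
  intro Ds V _
  unfold Spec_calcReachable calcReachable calcReachable_alt
  dsimp only
  have hA : (fun (reachable : List Int) (i : Nat) =>
      let value := (List.range Ds.length).foldl (fun value j =>
        if i &&& (1 <<< j) ≠ 0 then value + Ds.getD j 0 else value) 0
      if value ≤ V ∧ value ≠ 0 then PySem.Set.add reachable value else reachable)
      = (fun reachable i => if msum Ds i ≤ V ∧ msum Ds i ≠ 0
          then PySem.Set.add reachable (msum Ds i) else reachable) := by
    funext r i; simp only [innerLoop, zero_add]
  rw [hA, foldA, dpList]
  have hsing : ∀ l : List Nat, l.flatMap (fun m => [(0:Int)].map (fun a => a + msum Ds m))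
      = l.map (fun m => msum Ds m) := by
    intro l; induction l with
    | nil => rfl
    | cons x l ih =>
      simp only [List.flatMap_cons, List.map, zero_add, List.singleton_append]
      congr 1
      simpa using ih
  rw [hsing, PySem.Set.update_nil_left]
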